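-- pv_equiv track=rewrite | github.com/RQM-Technologies-dev/rqm-tech-papers | scripts/render_paper_html.py | split_top_level_items
-- ===== SOURCE A (Python) =====
-- def split_top_level_items(lines: list[str]) -> list[list[str]]:
--     items: list[list[str]] = []
--     current: list[str] = []
--     depth = 0
--     for line in lines:
--         stripped = line.strip()
--         if stripped.startswith("\\begin{") and not stripped.startswith("\\begin{itemize}") and not stripped.startswith("\\begin{enumerate}"):
--             depth += 1
--         elif stripped.startswith("\\end{") and not stripped.startswith("\\end{itemize}") and not stripped.startswith("\\end{enumerate}"):
--             depth = max(0, depth - 1)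
--         if stripped.startswith("\\item") and depth == 0:
--             if current:
--                 items.append(current)
--             current = [stripped[5:].strip()]
--         else:
--             current.append(line)
--     if current:
--         items.append(current)
--     return [item for item in items if any(part.strip() for part in item)]
-- ===== SOURCE B (Python) =====
-- def split_top_level_items(lines: list[str]) -> list[list[str]]:
--     # Pass 1 (forward): mark each line with its item text if it is a top-level \item.
--     marks: list[tuple[str, object]] = []
--     depth = 0
--     for line in lines:
--         stripped = line.strip()
--         if stripped.startswith("\\begin{") and not stripped.startswith("\\begin{itemize}") and not stripped.startswith("\\begin{enumerate}"):
--             depth += 1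
--         elif stripped.startswith("\\end{") and not stripped.startswith("\\end{itemize}") and not stripped.startswith("\\end{enumerate}"):
--             depth = max(0, depth - 1)
--         if stripped.startswith("\\item") and depth == 0:
--             marks.append((line, stripped[5:].strip()))
--         else:
--             marks.append((line, None))
--     # Pass 2 (backward): cut groups at the marked lines, building each group back-to-front.
--     head: list[str] = []
--     groups: list[list[str]] = []
--     for line, item in reversed(marks):
--         if item is None:
--             head.append(line)
--         else:
--             head.append(item)
--             groups.append(head[::-1])
--             head = []
--     groups.append(head[::-1])
--     groups.reverse()
--     return [g for g in groups if any(p.strip() for p in g)]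
-- ===== Notes on version B (the rewrite author's own statement) =====
-- stated objective: alternative
-- what changed: A's single forward loop with items/current accumulator state is replaced by a forward pass marking top-level \item lines, then a backward pass that cuts the groups at the marks, building each group back-to-front.
import Mathlib
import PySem

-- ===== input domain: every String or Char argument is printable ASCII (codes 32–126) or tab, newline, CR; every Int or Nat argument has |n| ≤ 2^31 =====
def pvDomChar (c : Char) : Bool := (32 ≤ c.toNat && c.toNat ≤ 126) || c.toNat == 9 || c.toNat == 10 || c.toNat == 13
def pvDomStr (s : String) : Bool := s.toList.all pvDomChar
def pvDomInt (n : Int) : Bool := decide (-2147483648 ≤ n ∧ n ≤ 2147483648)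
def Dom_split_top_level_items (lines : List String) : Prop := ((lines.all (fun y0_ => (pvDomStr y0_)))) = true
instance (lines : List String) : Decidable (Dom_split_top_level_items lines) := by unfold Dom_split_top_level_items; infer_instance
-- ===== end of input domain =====

-- B replaces A's single accumulator loop by a forward marking pass plus a backward
-- grouping pass; objective: alternative decomposition, same O(n) cost.

-- shared helpers: the begin/end/\item tests and the depth update both sources contain verbatim
def isBeginLine (s : String) : Bool :=
  PySem.Str.startswith s "\\begin{" && !(PySem.Str.startswith s "\\begin{itemize}")
    && !(PySem.Str.startswith s "\\begin{enumerate}")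

def isEndLine (s : String) : Bool :=
  PySem.Str.startswith s "\\end{" && !(PySem.Str.startswith s "\\end{itemize}")
    && !(PySem.Str.startswith s "\\end{enumerate}")

def nextDepth (d : Int) (s : String) : Int :=
  if isBeginLine s then d + 1 else if isEndLine s then max 0 (d - 1) else d

-- stripped[5:].strip()
def itemText (s : String) : String :=
  PySem.Str.strip (PySem.Str.slice s (some 5) none)

-- any(part.strip() for part in item)
def hasInk (item : List String) : Bool :=
  item.any (fun part => PySem.Str.strip part != "")

-- ===== PORT A =====
def stepA (st : List (List String) × List String × Int) (line : String) :
    List (List String) × List String × Int :=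
  let s := PySem.Str.strip line
  let depth := nextDepth st.2.2 s
  if PySem.Str.startswith s "\\item" && depth == 0 then
    (if st.2.1.isEmpty then st.1 else st.1 ++ [st.2.1], [itemText s], depth)
  else
    (st.1, st.2.1 ++ [line], depth)

def split_top_level_items (lines : List String) : List (List String) :=
  let st := lines.foldl stepA ([], [], 0)
  let items := if st.2.1.isEmpty then st.1 else st.1 ++ [st.2.1]
  items.filter hasInk

-- ===== PORT B =====
-- pass 1: mark each line with its item text if it is a top-level \item
def markStep (st : Int × List (String × Option String)) (line : String) :
    Int × List (String × Option String) :=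
  let s := PySem.Str.strip line
  let d := nextDepth st.1 s
  (d, st.2 ++ [(line, if PySem.Str.startswith s "\\item" && d == 0 then some (itemText s) else none)])

-- pass 2 (run over the reversed marks): cut groups at the marked lines, back-to-front
def cutStep (st : List String × List (List String)) (m : String × Option String) :
    List String × List (List String) :=
  match m.2 with
  | none => (st.1 ++ [m.1], st.2)
  | some it => ([], st.2 ++ [(st.1 ++ [it]).reverse])

def split_top_level_items_alt (lines : List String) : List (List String) :=
  let marks := (lines.foldl markStep (0, [])).2
  let st := marks.reverse.foldl cutStep ([], [])
  let groups := (st.2 ++ [st.1.reverse]).reverse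
  groups.filter hasInk

-- ===== PRECONDITION & SPEC =====
def Spec_split_top_level_items (lines : List String) (out : List (List String)) : Prop := out = split_top_level_items_alt lines
instance (lines : List String) (out : List (List String)) : Decidable (Spec_split_top_level_items lines out) := by unfold Spec_split_top_level_items; infer_instance

-- ===== CLAIM (what is proved, stated in full; the proofs are below) =====
def Claim_equal_split_top_level_items : Prop := ∀ (lines : List String), Dom_split_top_level_items lines → Spec_split_top_level_items lines (split_top_level_items lines)

-- ===== LEMMAS AND PROOFS =====

-- recursive characterisation of B's pass 1
def marksRec : List String → Int → List (String × Option String)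
  | [], _ => []
  | line :: rest, d =>
    let s := PySem.Str.strip line
    let d' := nextDepth d s
    (line, if PySem.Str.startswith s "\\item" && d' == 0 then some (itemText s) else none)
      :: marksRec rest d'

-- recursive characterisation of the grouping: (preamble group, item groups)
def grec : List (String × Option String) → List String × List (List String)
  | [] => ([], [])
  | (line, none) :: rest => let p := grec rest; (line :: p.1, p.2)
  | (_, some it) :: rest => let p := grec rest; ([], (it :: p.1) :: p.2)

theorem markStep_eq (lines : List String) (d : Int) (acc : List (String × Option String)) :
    (lines.foldl markStep (d, acc)).2 = acc ++ marksRec lines d := by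
  induction lines generalizing d acc with
  | nil => simp [marksRec]
  | cons line rest ih =>
    simp only [List.foldl_cons, marksRec]
    rw [ih]
    simp [markStep]

theorem cutStep_eq (ms : List (String × Option String)) :
    ms.foldr (fun m s => cutStep s m) ([], []) = ((grec ms).1.reverse, (grec ms).2.reverse) := by
  induction ms with
  | nil => simp [grec]
  | cons m rest ih =>
    obtain ⟨line, it?⟩ := m
    simp only [List.foldr_cons]
    rw [ih]
    cases it? with
    | none => simp [grec, cutStep]
    | some it => simp [grec, cutStep]

-- finalize A's loop state
def finalizeA (st : List (List String) × List String × Int) : List (List String) :=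
  if st.2.1.isEmpty then st.1 else st.1 ++ [st.2.1]

-- drop an empty head group
def dhe (h : List String) (t : List (List String)) : List (List String) :=
  if h.isEmpty then t else h :: t

theorem foldA_eq (lines : List String) (d : Int) (I : List (List String)) (c : List String) :
    finalizeA (lines.foldl stepA (I, c, d)) =
      I ++ dhe (c ++ (grec (marksRec lines d)).1) (grec (marksRec lines d)).2 := by
  induction lines generalizing d I c with
  | nil =>
    simp only [List.foldl_nil, marksRec, grec, finalizeA, dhe, List.append_nil]
    cases c <;> simp
  | cons line rest ih =>
    simp only [List.foldl_cons, marksRec, stepA]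
    cases hb : (PySem.Str.startswith (PySem.Str.strip line) "\\item"
        && (nextDepth d (PySem.Str.strip line)) == 0) with
    | true =>
      rw [if_pos (rfl : true = true), if_pos (rfl : true = true), ih]
      simp only [grec]
      cases c with
      | nil => simp [dhe]
      | cons a l => simp [dhe]
    | false =>
      rw [if_neg Bool.false_ne_true, if_neg Bool.false_ne_true, ih]
      simp [grec, dhe, List.append_assoc]
-- ===== VERDICT (by name: the statement is the Claim_ definition above) =====
theorem split_top_level_items_spec : Claim_equal_split_top_level_items := by
  intro lines _
  unfold Spec_split_top_level_items
  calc split_top_level_items lines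
      = (finalizeA (lines.foldl stepA ([], [], 0))).filter hasInk := rfl
    _ = (dhe ((grec (marksRec lines 0)).1) ((grec (marksRec lines 0)).2)).filter hasInk := by
        rw [foldA_eq]; simp [dhe]
    _ = ((grec (marksRec lines 0)).1 :: (grec (marksRec lines 0)).2).filter hasInk := by
        unfold dhe
        split_ifs with hh
        · rw [List.isEmpty_iff.mp hh]
          simp [hasInk]
        · rfl
    _ = split_top_level_items_alt lines := by
        simp only [split_top_level_items_alt]
        rw [markStep_eq lines 0 [], List.foldl_reverse]
        simp only [List.nil_append]
        rw [cutStep_eq]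
        simp
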